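-- pv_equiv track=rewrite | github.com/AmarNathH/software | vision/modules/buoys.py | compare_element_orders
-- ===== SOURCE A (Python) =====
-- def compare_element_orders(list1, list2):
--     k = 0
--     for i in range(len(list1)):
--         for j in range(len(list2)):
--             if list1[i] == list2[j]:
--                 if j < k:
--
--                     return False
--                 else:
--                     k = j
--     return True
-- ===== SOURCE B (Python) =====
-- def compare_element_orders(list1, list2):
--     span = {}
--     for j, v in enumerate(list2):
--         if v in span:
--             span[v] = (span[v][0], j)
--         else:
--             span[v] = (j, j)
--     k = 0
--     for x in list1:
--         if x in span:
--             first, last = span[x]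
--             if first < k:
--                 return False
--             k = last
--     return True
-- ===== Notes on version B (the rewrite author's own statement) =====
-- stated objective: faster
-- what changed: Replaced the nested scan of list2 for every element of list1 by a dict built once mapping each value of list2 to its (first, last) index span, then a single pass over list1.
import Mathlib
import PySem

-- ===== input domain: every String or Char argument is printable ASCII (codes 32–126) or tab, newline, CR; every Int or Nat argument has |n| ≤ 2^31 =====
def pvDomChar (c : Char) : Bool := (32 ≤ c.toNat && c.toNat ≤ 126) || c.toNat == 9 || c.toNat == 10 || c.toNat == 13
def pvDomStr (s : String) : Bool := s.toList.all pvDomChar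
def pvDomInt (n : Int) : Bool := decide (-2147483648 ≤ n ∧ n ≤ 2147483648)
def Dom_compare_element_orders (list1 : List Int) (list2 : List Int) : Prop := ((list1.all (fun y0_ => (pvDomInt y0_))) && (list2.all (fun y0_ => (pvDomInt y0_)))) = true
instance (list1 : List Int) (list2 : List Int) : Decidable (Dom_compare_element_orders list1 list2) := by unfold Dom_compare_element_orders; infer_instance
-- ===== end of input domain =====

-- B builds a dict value -> (first,last) index in list2 once and makes a single pass over list1,
-- replacing A's nested rescans of list2 (asymptotically faster; return value proved equal).


-- ===== PORT A =====
-- inner 'for j in range(len(list2))' loop: scans list2 with index j and threshold k;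
-- none = 'return False', some k' = fall through with updated k
def pvAInner (x : Int) (l2 : List Int) (j k : Int) : Option Int :=
  match l2 with
  | [] => some k
  | y :: t => if x = y then (if j < k then none else pvAInner x t (j + 1) j)
              else pvAInner x t (j + 1) k

-- outer 'for i in range(len(list1))' loop
def pvAOuter (l1 l2 : List Int) (k : Int) : Bool :=
  match l1 with
  | [] => true
  | x :: t =>
    match pvAInner x l2 0 k with
    | none => false
    | some k' => pvAOuter t l2 k'

def compare_element_orders (list1 : List Int) (list2 : List Int) : Bool :=
  pvAOuter list1 list2 0

-- ===== PORT B =====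
-- 'for j, v in enumerate(list2)': build span dict value -> (first index, last index)
def pvBBuild (l2 : List Int) (j : Int) (d : PySem.Dict Int (Int × Int)) : PySem.Dict Int (Int × Int) :=
  match l2 with
  | [] => d
  | v :: t =>
    pvBBuild t (j + 1)
      (match d.get? v with
       | some p => d.insert v (p.1, j)
       | none => d.insert v (j, j))

-- 'for x in list1' loop with early return False
def pvBLoop (l1 : List Int) (d : PySem.Dict Int (Int × Int)) (k : Int) : Bool :=
  match l1 with
  | [] => true
  | x :: t =>
    match d.get? x with
    | none => pvBLoop t d k
    | some p => if p.1 < k then false else pvBLoop t d p.2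

def compare_element_orders_alt (list1 : List Int) (list2 : List Int) : Bool :=
  pvBLoop list1 (pvBBuild list2 0 PySem.Dict.empty) 0

-- ===== PRECONDITION & SPEC =====
def Spec_compare_element_orders (list1 : List Int) (list2 : List Int) (out : Bool) : Prop := out = compare_element_orders_alt list1 list2
instance (list1 : List Int) (list2 : List Int) (out : Bool) : Decidable (Spec_compare_element_orders list1 list2 out) := by unfold Spec_compare_element_orders; infer_instance

-- ===== CLAIM (what is proved, stated in full; the proofs are below) =====
def Claim_equal_compare_element_orders : Prop := ∀ (list1 : List Int) (list2 : List Int), Dom_compare_element_orders list1 list2 → Spec_compare_element_orders list1 list2 (compare_element_orders list1 list2)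

-- ===== LEMMAS AND PROOFS =====

-- proof-side characterisation: (first, last) occurrence indices (as Nat offsets) of x in a list
def pvSpan (x : Int) : List Int → Option (Nat × Nat)
  | [] => none
  | y :: t =>
    match pvSpan x t with
    | some p => if x = y then some (0, p.2 + 1) else some (p.1 + 1, p.2 + 1)
    | none => if x = y then some (0, 0) else none

theorem pvAInner_eq_span (x : Int) (l2 : List Int) (j k : Int) :
    pvAInner x l2 j k =
      match pvSpan x l2 with
      | none => some k
      | some p => if j + (p.1 : Int) < k then none else some (j + (p.2 : Int)) := by
  induction l2 generalizing j k with
  | nil => simp [pvAInner, pvSpan]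
  | cons y t ih =>
    by_cases hxy : x = y
    · cases hs : pvSpan x t with
      | none =>
        simp only [pvAInner, pvSpan, ih, hs, if_pos hxy]
        by_cases h1 : j < k
        · simp [h1]
        · simp [h1]
      | some p =>
        simp only [pvAInner, pvSpan, ih, hs, if_pos hxy]
        have h3 : ¬ (j + 1 + (p.1 : Int) < j) := by omega
        by_cases h1 : j < k
        · simp [h1]
        · have h2 : ¬ (j + ((0 : Nat) : Int) < k) := by omega
          simp only [if_neg h1, if_neg h2, if_neg h3]
          congr 1
          push_cast
          omega
    · cases hs : pvSpan x t with
      | none => simp [pvAInner, pvSpan, ih, hs, hxy]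
      | some p =>
        simp only [pvAInner, pvSpan, ih, hs, if_neg hxy]
        by_cases h1 : j + 1 + (p.1 : Int) < k
        · have h2 : j + ((p.1 + 1 : Nat) : Int) < k := by push_cast; omega
          simp only [if_pos h1, if_pos h2]
        · have h2 : ¬ (j + ((p.1 + 1 : Nat) : Int) < k) := by push_cast; omega
          simp only [if_neg h1, if_neg h2]
          congr 1
          push_cast
          omega

theorem pvBBuild_get (x : Int) (l2 : List Int) (j : Int) (d : PySem.Dict Int (Int × Int)) :
    (pvBBuild l2 j d).get? x =
      match d.get? x, pvSpan x l2 with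
      | none, none => none
      | some p, none => some p
      | none, some q => some ((j + (q.1 : Int), j + (q.2 : Int)))
      | some p, some q => some ((p.1, j + (q.2 : Int))) := by
  induction l2 generalizing j d with
  | nil => cases hd : d.get? x <;> simp [pvBBuild, pvSpan, hd]
  | cons v t ih =>
    by_cases hxv : x = v
    · subst hxv
      simp only [pvBBuild, pvSpan]
      cases hd : d.get? x with
      | none =>
        simp only [ih, PySem.Dict.get?_insert_self]
        cases hs : pvSpan x t with
        | none => simp
        | some q => push_cast; ring_nf
      | some p =>
        simp only [ih, PySem.Dict.get?_insert_self]
        cases hs : pvSpan x t with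
        | none => simp
        | some q => push_cast; ring_nf
    · simp only [pvBBuild, pvSpan]
      have hins : ∀ (w : Int × Int), (d.insert v w).get? x = d.get? x := fun w => by
        simp [PySem.Dict.get?_insert, hxv]
      cases hd : d.get? v with
      | none =>
        simp only [ih, hins]
        cases hdx : d.get? x <;> cases hs : pvSpan x t <;>
          simp only [if_neg hxv] <;> push_cast <;> ring_nf
      | some p =>
        simp only [ih, hins]
        cases hdx : d.get? x <;> cases hs : pvSpan x t <;>
          simp only [if_neg hxv] <;> push_cast <;> ring_nf

theorem pvOuter_eq_loop (l1 l2 : List Int) (k : Int) :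
    pvAOuter l1 l2 k = pvBLoop l1 (pvBBuild l2 0 PySem.Dict.empty) k := by
  induction l1 generalizing k with
  | nil => rfl
  | cons x t ih =>
    simp only [pvAOuter, pvBLoop, pvAInner_eq_span, pvBBuild_get, PySem.Dict.get?_empty]
    cases hs : pvSpan x l2 with
    | none => simpa using ih k
    | some q =>
      by_cases hk : (q.1 : Int) < k
      · simp [hk]
      · have h0 : ¬ ((0 : Int) + (q.1 : Int) < k) := by omega
        simp only [h0, if_false]
        simpa using ih ((0 : Int) + (q.2 : Int))

-- ===== VERDICT (by name: the statement is the Claim_ definition above) =====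
theorem compare_element_orders_spec : Claim_equal_compare_element_orders := by
  intro l1 l2 _
  unfold Spec_compare_element_orders compare_element_orders compare_element_orders_alt
  exact pvOuter_eq_loop l1 l2 0
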